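-- pv_equiv track=rewrite | github.com/kudinov-fedor/python-core-training | irepela/homework_2/three_words.py | has_three_words_in_sequence_sol_2
-- ===== SOURCE A (Python) =====
-- def has_three_words_in_sequence_sol_2(text: str) -> bool:
--     """
--         Checks if text has 3 words in sequence
--
--         Args:
--             text (str): text to analyze words in sequence
--
--         Returns:
--             bool: True if the text contains 3 words in sequence
--     """
--     word_list = text.split()
--     has_three_words = False
--     for index in range(len(word_list) - 2):
--         three_words = word_list[index: index + 3]
--         has_three_words = all(not word.isnumeric() for word in three_words)
--         if has_three_words:
--             break
--     return has_three_words
-- ===== SOURCE B (Python) =====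
-- def has_three_words_in_sequence_sol_2(text: str) -> bool:
--     count = 0
--     for word in text.split():
--         if not word.isnumeric():
--             count += 1
--             if count == 3:
--                 return True
--         else:
--             count = 0
--     return False
-- ===== Notes on version B (the rewrite author's own statement) =====
-- stated objective: simpler
-- what changed: Replaces the overlapping 3-word window scan (slice + all per index) with a single streaming pass keeping a counter of consecutive non-numeric words, reset on numeric words.
import Mathlib
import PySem

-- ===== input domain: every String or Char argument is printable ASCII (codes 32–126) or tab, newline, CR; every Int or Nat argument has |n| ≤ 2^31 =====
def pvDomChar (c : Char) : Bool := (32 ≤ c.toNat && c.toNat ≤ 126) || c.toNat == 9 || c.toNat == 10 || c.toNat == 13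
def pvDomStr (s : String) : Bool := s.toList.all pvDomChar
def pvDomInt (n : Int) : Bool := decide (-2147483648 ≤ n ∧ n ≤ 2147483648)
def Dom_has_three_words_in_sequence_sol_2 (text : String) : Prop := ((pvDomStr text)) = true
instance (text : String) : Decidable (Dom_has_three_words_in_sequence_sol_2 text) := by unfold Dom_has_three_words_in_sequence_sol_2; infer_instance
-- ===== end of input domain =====

-- B replaces A's overlapping 3-word window scan with a single streaming pass keeping a
-- counter of consecutive non-numeric words (simpler, no slicing).
-- On the ASCII input domain str.isnumeric() coincides with str.isdigit(), ported as PySem.Str.strIsdigit (exact on Dom).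

-- ===== PORT A =====
-- the 'for index in range(len(word_list) - 2)' loop with its break, state = has_three_words
def pvLoopA (wl : List String) : List Int → Bool → Bool
  | [], acc => acc
  | i :: rest, _ =>
    let three_words := PySem.List.slice wl (some i) (some (i + 3))
    let h := three_words.all (fun w => !PySem.Str.strIsdigit w)
    if h then h else pvLoopA wl rest h

def has_three_words_in_sequence_sol_2 (text : String) : Bool :=
  let word_list := PySem.Str.split₀ text
  pvLoopA word_list (PySem.List.pyRange 0 ((word_list.length : Int) - 2) 1) false

-- ===== PORT B =====
-- the 'for word in text.split()' loop, state = count of consecutive non-numeric words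
def pvLoopB : List String → Int → Bool
  | [], _ => false
  | w :: ws, count =>
    if !PySem.Str.strIsdigit w then
      if count + 1 = 3 then true else pvLoopB ws (count + 1)
    else pvLoopB ws 0

def has_three_words_in_sequence_sol_2_alt (text : String) : Bool :=
  pvLoopB (PySem.Str.split₀ text) 0

-- ===== PRECONDITION & SPEC =====
def Spec_has_three_words_in_sequence_sol_2 (text : String) (out : Bool) : Prop := out = has_three_words_in_sequence_sol_2_alt text
instance (text : String) (out : Bool) : Decidable (Spec_has_three_words_in_sequence_sol_2 text out) := by unfold Spec_has_three_words_in_sequence_sol_2; infer_instance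

-- ===== CLAIM (what is proved, stated in full; the proofs are below) =====
def Claim_equal_has_three_words_in_sequence_sol_2 : Prop := ∀ (text : String), Dom_has_three_words_in_sequence_sol_2 text → Spec_has_three_words_in_sequence_sol_2 text (has_three_words_in_sequence_sol_2 text)

-- ===== LEMMAS AND PROOFS =====

-- abbreviation used only by the proofs
def pvNN (w : String) : Bool := !PySem.Str.strIsdigit w

-- "some window of 3 consecutive non-numeric words exists", structurally
def pvGood3 : List String → Bool
  | a :: b :: c :: rest => (pvNN a && pvNN b && pvNN c) || pvGood3 (b :: c :: rest)
  | _ => false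

-- "the first k words exist and are non-numeric"
def pvPrefixNN : List String → Nat → Bool
  | _, 0 => true
  | [], _ + 1 => false
  | w :: ws, k + 1 => pvNN w && pvPrefixNN ws k

lemma pvPrefixNN_mono : ∀ (ws : List String) (j k : Nat), j ≤ k → pvPrefixNN ws k = true → pvPrefixNN ws j = true := by
  intro ws
  induction ws with
  | nil => intro j k hjk h; cases j with
    | zero => rfl
    | succ j => cases k with
      | zero => omega
      | succ k => simp [pvPrefixNN] at h
  | cons w ws ih =>
    intro j k hjk h
    cases j with
    | zero => rfl
    | succ j =>
      cases k with
      | zero => omega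
      | succ k =>
        simp [pvPrefixNN] at h ⊢
        exact ⟨h.1, ih j k (by omega) h.2⟩

lemma pvPrefix3_good3 (ws : List String) (h : pvPrefixNN ws 3 = true) : pvGood3 ws = true := by
  match ws with
  | [] => simp [pvPrefixNN] at h
  | [a] => simp [pvPrefixNN] at h
  | [a, b] => simp [pvPrefixNN] at h
  | a :: b :: c :: rest =>
    simp [pvPrefixNN] at h
    simp [pvGood3, h.1, h.2.1, h.2.2]

lemma pvSlice_shift (a : String) (ws : List String) (s : Int) (hs : 0 ≤ s) :
    PySem.List.slice (a :: ws) (some (s + 1)) (some (s + 1 + 3)) = PySem.List.slice ws (some s) (some (s + 3)) := by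
  rw [PySem.List.slice_toNat (a :: ws) (by omega) (by omega),
      PySem.List.slice_toNat ws hs (by omega)]
  have h1 : (s + 1).toNat = s.toNat + 1 := by omega
  rw [h1, List.drop_succ_cons]
  congr 1
  omega

lemma pvLoopA_shift (a : String) (ws : List String) :
    ∀ (l : List Int) (acc : Bool), (∀ i ∈ l, 0 ≤ i) →
      pvLoopA (a :: ws) (l.map (· + 1)) acc = pvLoopA ws l acc := by
  intro l
  induction l with
  | nil => intro acc _; rfl
  | cons i l ih =>
    intro acc hpos
    have hi : 0 ≤ i := hpos i (by simp)
    simp only [List.map_cons, pvLoopA, pvSlice_shift a ws i hi]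
    split
    · rfl
    · exact ih _ (fun j hj => hpos j (by simp [hj]))

-- the index list range(0, m) as ints
def pvIdx (m : Nat) : List Int := (List.range m).map (fun k => Int.ofNat k)

lemma pvIdx_succ (m : Nat) : pvIdx (m + 1) = 0 :: (pvIdx m).map (· + 1) := by
  unfold pvIdx
  rw [List.range_succ_eq_map, List.map_cons, List.map_map, List.map_map]
  congr 1

lemma pvIdx_nonneg (m : Nat) : ∀ i ∈ pvIdx m, 0 ≤ i := by
  intro i hi
  unfold pvIdx at hi
  simp at hi
  obtain ⟨k, _, rfl⟩ := hi
  positivity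

lemma pvRange_eq_idx (b : Int) : PySem.List.pyRange 0 b = pvIdx b.toNat := by
  rw [PySem.List.pyRange_one]
  unfold pvIdx
  simp only [Int.sub_zero, zero_add]
  congr 1

lemma pvLoopA_eq_good3 : ∀ wl : List String,
    pvLoopA wl (PySem.List.pyRange 0 ((wl.length : Int) - 2) 1) false = pvGood3 wl := by
  intro wl
  induction wl with
  | nil => rw [pvRange_eq_idx]; rfl
  | cons a tl ih =>
    match tl with
    | [] => rw [pvRange_eq_idx]; rfl
    | [b] => rw [pvRange_eq_idx]; rfl
    | b :: c :: rest =>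
      rw [pvRange_eq_idx] at ih ⊢
      have hlen : (((a :: b :: c :: rest).length : Int) - 2).toNat = rest.length + 1 := by
        rw [show (((a :: b :: c :: rest).length : Int)) - 2 = ((rest.length + 1 : Nat) : Int) by
          simp only [List.length_cons]; push_cast; ring]
        exact Int.toNat_natCast _
      have hlen' : (((b :: c :: rest).length : Int) - 2).toNat = rest.length := by
        rw [show (((b :: c :: rest).length : Int)) - 2 = ((rest.length : Nat) : Int) by
          simp only [List.length_cons]; push_cast; ring]
        exact Int.toNat_natCast _
      rw [hlen, pvIdx_succ]
      simp only [pvLoopA]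
      have hsl : PySem.List.slice (a :: b :: c :: rest) (some 0) (some (0 + 3)) = [a, b, c] := by
        rw [PySem.List.slice_toNat _ (by omega) (by omega)]
        rfl
      rw [hsl]
      simp only [List.all_cons, List.all_nil, Bool.and_true]
      by_cases hw : (!PySem.Str.strIsdigit a && (!PySem.Str.strIsdigit b && !PySem.Str.strIsdigit c)) = true
      · rw [if_pos hw, hw]
        rw [show pvGood3 (a :: b :: c :: rest) = ((pvNN a && pvNN b && pvNN c) || pvGood3 (b :: c :: rest)) from rfl]
        simp only [pvNN, Bool.and_assoc]
        rw [hw]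
        simp
      · rw [if_neg hw]
        rw [pvLoopA_shift a (b :: c :: rest) _ _ (pvIdx_nonneg _)]
        rw [hlen'] at ih
        have hb : (!PySem.Str.strIsdigit a && (!PySem.Str.strIsdigit b && !PySem.Str.strIsdigit c)) = false := by
          simpa using hw
        rw [hb, ih]
        rw [show pvGood3 (a :: b :: c :: rest) = ((pvNN a && pvNN b && pvNN c) || pvGood3 (b :: c :: rest)) from rfl]
        have hfalse : (pvNN a && pvNN b && pvNN c) = false := by
          simp only [pvNN, Bool.and_assoc]
          simpa using hw
        rw [hfalse, Bool.false_or]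

lemma pvLoopB_eq : ∀ (wl : List String) (c : Nat), c ≤ 2 →
    pvLoopB wl (c : Int) = (pvGood3 wl || pvPrefixNN wl (3 - c)) := by
  intro wl
  induction wl with
  | nil =>
    intro c hc
    have h : 3 - c = (2 - c) + 1 := by omega
    rw [h]
    simp [pvLoopB, pvGood3, pvPrefixNN]
  | cons w ws ih =>
    intro c hc
    by_cases hw : pvNN w = true
    · simp only [pvLoopB, pvNN] at hw ⊢
      rw [hw]
      simp only [if_true]
      by_cases hc2 : c = 2
      · subst hc2
        rw [if_pos (by norm_num)]
        have h32 : 3 - 2 = 1 := by omega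
        rw [h32]
        have hw' : PySem.Chars.strIsdigit w.toList = false := by simpa using hw
        simp [pvPrefixNN, pvNN, hw']
      · rw [if_neg (by omega)]
        have hcast : (c : Int) + 1 = ((c + 1 : Nat) : Int) := by push_cast; ring
        rw [hcast, ih (c + 1) (by omega)]
        have h1 : 3 - c = (2 - c) + 1 := by omega
        have h2 : 3 - (c + 1) = 2 - c := by omega
        rw [h1, h2]
        -- RHS prefix on (w :: ws) unfolds through nn w = true
        have hw' : PySem.Chars.strIsdigit w.toList = false := by simpa using hw
        have hpre : pvPrefixNN (w :: ws) ((2 - c) + 1) = pvPrefixNN ws (2 - c) := by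
          simp [pvPrefixNN, pvNN, hw']
        rw [hpre]
        -- pvGood3 (w :: ws) || p = pvGood3 ws || p  given nn w and p ≥ first-2 window
        match ws with
        | [] => simp [pvGood3]
        | [b] => simp [pvGood3]
        | b :: c' :: rest =>
          rw [show pvGood3 (w :: b :: c' :: rest) = ((pvNN w && pvNN b && pvNN c') || pvGood3 (b :: c' :: rest)) from rfl]
          by_cases hbc : (pvNN b && pvNN c') = true
          · -- the extra window is absorbed by the prefix disjunct
            have hp2 : pvPrefixNN (b :: c' :: rest) 2 = true := by
              simp [pvPrefixNN] at hbc ⊢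
              exact hbc
            have hp : pvPrefixNN (b :: c' :: rest) (2 - c) = true :=
              pvPrefixNN_mono _ _ _ (by omega) hp2
            rw [hp]
            simp
          · have : (pvNN w && pvNN b && pvNN c') = false := by
              rw [Bool.and_assoc]
              simp only [Bool.and_eq_true] at *
              cases hb : pvNN b <;> cases hc' : pvNN c' <;> simp_all
            rw [this, Bool.false_or]
    · simp only [pvLoopB, pvNN] at hw ⊢
      rw [Bool.not_eq_true] at hw
      rw [hw]
      simp only [if_false, Bool.false_eq_true]
      have h0 : (0 : Int) = ((0 : Nat) : Int) := rfl
      rw [h0, ih 0 (by omega)]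
      have h3 : (3 : Nat) - 0 = 3 := rfl
      rw [h3]
      have hw'' : PySem.Chars.strIsdigit w.toList = true := by simpa using hw
      have hpre : pvPrefixNN (w :: ws) (3 - c) = false := by
        have : 3 - c = (2 - c) + 1 := by omega
        rw [this]
        simp [pvPrefixNN, pvNN, hw'']
      rw [hpre, Bool.or_false]
      have hg : pvGood3 (w :: ws) = pvGood3 ws := by
        match ws with
        | [] => simp [pvGood3]
        | [b] => simp [pvGood3]
        | b :: c' :: rest =>
          rw [show pvGood3 (w :: b :: c' :: rest) = ((pvNN w && pvNN b && pvNN c') || pvGood3 (b :: c' :: rest)) from rfl]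
          simp [pvNN, hw'']
      rw [hg]
      by_cases hp3 : pvPrefixNN ws 3 = true
      · rw [hp3, pvPrefix3_good3 ws hp3]
        simp
      · rw [Bool.not_eq_true] at hp3
        rw [hp3, Bool.or_false]

-- ===== VERDICT (by name: the statement is the Claim_ definition above) =====
theorem has_three_words_in_sequence_sol_2_spec : Claim_equal_has_three_words_in_sequence_sol_2 := by
  intro text _
  unfold Spec_has_three_words_in_sequence_sol_2 has_three_words_in_sequence_sol_2 has_three_words_in_sequence_sol_2_alt
  rw [pvLoopA_eq_good3]
  rw [show (0 : Int) = ((0 : Nat) : Int) from rfl, pvLoopB_eq _ 0 (by omega)]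
  by_cases hp3 : pvPrefixNN (PySem.Str.split₀ text) 3 = true
  · rw [hp3, pvPrefix3_good3 _ hp3]
    rfl
  · rw [Bool.not_eq_true] at hp3
    rw [hp3, Bool.or_false]
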